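-- pv_equiv track=rewrite | github.com/ephraimmwai/DSND-Article-Recommendation-System | user_item_based.py | email_mapper
-- ===== SOURCE A (Python) =====
-- def email_mapper(df_email_col):
--     '''
--     INPUT:
--     df_email_col - email column name
--
--     OUTPUT:
--     email_encoded - encoded email column
--     '''
--     coded_dict = dict()
--     cter = 1
--     email_encoded = []
--
--     for val in df_email_col:
--         if val not in coded_dict:
--             coded_dict[val] = cter
--             cter+=1
--
--         email_encoded.append(coded_dict[val])
--     return email_encoded
-- ===== SOURCE B (Python) =====
-- def email_mapper(df_email_col):
--     '''Sort-based encoding: ids come from first-occurrence positions found by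
--     sorting the indices by (value, position) — no hash map over the values.'''
--     col = list(df_email_col)
--     n = len(col)
--     order = sorted(range(n), key=lambda i: (col[i], i))
--     # fp[i] = position of the first occurrence of col[i]: in (value, position)
--     # order equal values are consecutive, headed by their first occurrence.
--     fp = [0] * n
--     prev = -1
--     for i in order:
--         if prev >= 0 and col[prev] == col[i]:
--             fp[i] = fp[prev]
--         else:
--             fp[i] = i
--         prev = i
--     # Numbering the first-occurrence positions left to right yields the
--     # first-appearance ids 1, 2, 3, ...
--     ids = [0] * n
--     c = 0
--     for p in range(n):
--         if fp[p] == p: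
--             c += 1
--             ids[p] = c
--     return [ids[fp[i]] for i in range(n)]
-- ===== Notes on version B (the rewrite author's own statement) =====
-- stated objective: alternative
-- what changed: Replaces A's hash-dict-with-counter single pass by a sort-based algorithm: indices are sorted by (value, position), run heads of that order give each position its first-occurrence position, and numbering those first-occurrence positions left to right yields the ids — no value-keyed dictionary at all.
import Mathlib
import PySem

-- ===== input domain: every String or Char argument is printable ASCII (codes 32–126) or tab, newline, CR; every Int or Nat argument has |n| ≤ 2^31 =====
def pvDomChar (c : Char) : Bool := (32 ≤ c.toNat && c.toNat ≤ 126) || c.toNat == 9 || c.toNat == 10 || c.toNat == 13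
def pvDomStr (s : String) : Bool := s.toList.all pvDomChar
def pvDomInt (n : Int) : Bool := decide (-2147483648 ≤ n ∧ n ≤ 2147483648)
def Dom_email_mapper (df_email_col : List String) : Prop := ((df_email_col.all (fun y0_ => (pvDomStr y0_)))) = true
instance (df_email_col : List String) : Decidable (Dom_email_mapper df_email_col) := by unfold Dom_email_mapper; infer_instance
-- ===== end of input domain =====

-- B replaces A's value-keyed dict-plus-counter pass by a sort-based algorithm: indices sorted by
-- (value, position), run heads give first-occurrence positions, numbering those gives the ids (alternative).

-- ===== PORT A =====
-- loop body of A: guarded dict/counter mutation, then append coded_dict[val]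
def emStep (st : PySem.Dict String Int × Int × List Int) (val : String) :
    PySem.Dict String Int × Int × List Int :=
  let p := if !st.1.contains val then (st.1.insert val st.2.1, st.2.1 + 1) else (st.1, st.2.1)
  -- p.1.getD val 0: Python's coded_dict[val]; the key is always present here, so the default is never used
  (p.1, p.2, st.2.2 ++ [p.1.getD val 0])

def email_mapper (df_email_col : List String) : List Int :=
  (df_email_col.foldl emStep (PySem.Dict.empty, 1, [])).2.2

-- ===== PORT B =====
-- loop body of B's first pass: 'if prev >= 0 and col[prev] == col[i]: fp[i] = fp[prev] else: fp[i] = i; prev = i'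
def emStepB (col : List String) (st : List Int × Int) (i : Int) : List Int × Int :=
  let fp := st.1
  let prev := st.2
  -- fp[prev] / fp[i]: indices produced by the loop are always in range, so pyGetD's default is never used
  if 0 ≤ prev ∧ PySem.List.pyGetD col prev "" = PySem.List.pyGetD col i "" then
    (PySem.List.pySetD fp i (PySem.List.pyGetD fp prev 0), i)
  else
    (PySem.List.pySetD fp i i, i)

-- loop body of B's second pass: 'if fp[p] == p: c += 1; ids[p] = c'
def emStepC (fp : List Int) (st : List Int × Int) (p : Int) : List Int × Int :=
  if PySem.List.pyGetD fp p 0 = p then (PySem.List.pySetD st.1 p (st.2 + 1), st.2 + 1) else st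

def email_mapper_alt (df_email_col : List String) : List Int :=
  let col := df_email_col
  let n : Int := col.length
  -- order = sorted(range(n), key=lambda i: (col[i], i))
  let order := PySem.List.sorted2 (PySem.List.pyRange 0 n 1)
      (fun i => PySem.List.pyGetD col i "") (fun i => i)
  -- fp = [0] * n; prev = -1; for i in order: …
  let fp := (order.foldl (emStepB col) (PySem.List.pyRepeat [0] n, -1)).1
  -- ids = [0] * n; c = 0; for p in range(n): …
  let ids := ((PySem.List.pyRange 0 n 1).foldl (emStepC fp) (PySem.List.pyRepeat [0] n, 0)).1
  -- [ids[fp[i]] for i in range(n)]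
  (PySem.List.pyRange 0 n 1).map (fun i => PySem.List.pyGetD ids (PySem.List.pyGetD fp i 0) 0)

-- ===== PRECONDITION & SPEC =====
def Spec_email_mapper (df_email_col : List String) (out : List Int) : Prop := out = email_mapper_alt df_email_col
instance (df_email_col : List String) (out : List Int) : Decidable (Spec_email_mapper df_email_col out) := by unfold Spec_email_mapper; infer_instance

-- ===== CLAIM (what is proved, stated in full; the proofs are below) =====
def Claim_equal_email_mapper : Prop := ∀ (df_email_col : List String), Dom_email_mapper df_email_col → Spec_email_mapper df_email_col (email_mapper df_email_col)

-- ===== LEMMAS AND PROOFS =====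

-- ---- proof-side vocabulary ----
-- col[i] as the B port reads it
def emVal (col : List String) (i : Int) : String := PySem.List.pyGetD col i ""
-- the indices holding value v, in increasing order
def emGrp (col : List String) (v : String) : List Int :=
  (PySem.List.pyRange 0 col.length 1).filter (fun i => emVal col i == v)
-- the distinct values in Python string order
def emSvals (col : List String) : List String := PySem.List.sorted (PySem.List.dedup col) (fun v => v)
-- the sorted index order, named: groups of equal values, values ascending, indices ascending inside
def emOrd (col : List String) : List Int := ((emSvals col).map (emGrp col)).flatten
-- first-occurrence position of v
def emFirstN (col : List String) (v : String) : Nat := (PySem.List.index? col v).getD 0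
-- 'position q introduces a new value'
def emNew (col : List String) (q : Nat) : Bool := decide (col.getD q "" ∉ col.take q)
-- the dict A builds, reconstructed: value ↦ 1 + its index among the distinct values
def emMapping (uniques : List String) : PySem.Dict String Int :=
  PySem.Dict.ofList ((PySem.List.enumerate uniques 0).map (fun p => (p.2, p.1 + 1)))

-- ---- A-side: A's loop returns, per element, 1 + the index of its value among the distinct values ----
lemma items_emMapping (u : List String) (hu : u.Nodup) :
    (emMapping u).items = (PySem.List.enumerate u 0).map (fun p => (p.2, p.1 + 1)) := by
  have h := PySem.Dict.items_foldl_insert_fresh (κ := String) (ν := Int)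
      ((PySem.List.enumerate u 0).map (fun p => (p.2, p.1 + 1))) Prod.fst Prod.snd PySem.Dict.empty
      (by intro a _; simp)
      (by simpa [Function.comp_def] using hu)
  simpa [emMapping, PySem.Dict.ofList] using h

lemma keys_emMapping (u : List String) (hu : u.Nodup) : (emMapping u).keys = u := by
  have h := items_emMapping u hu
  simp only [PySem.Dict.keys, h, List.map_map]
  simp [Function.comp_def]

lemma contains_emMapping (u : List String) (hu : u.Nodup) (v : String) :
    (emMapping u).contains v = decide (v ∈ u) := by
  rw [PySem.Dict.contains_eq_decide_mem_keys, keys_emMapping u hu]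

lemma getD_emMapping (u : List String) (hu : u.Nodup) (v : String) (k : Nat)
    (hk : PySem.List.index? u v = some k) :
    (emMapping u).getD v 0 = (k : Int) + 1 := by
  obtain ⟨hklt, hvk, -⟩ := PySem.List.getElem_of_index?_eq_some hk
  have hmem' : ((0 : Int) + k, u[k]'hklt) ∈ PySem.List.enumerate u 0 :=
    (PySem.List.mem_enumerate_iff u 0 _).mpr ⟨k, hklt, rfl⟩
  have hmem : (v, (k : Int) + 1) ∈ (emMapping u).items := by
    rw [items_emMapping u hu]
    refine List.mem_map.mpr ⟨_, hmem', ?_⟩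
    simp [hvk]
  exact PySem.Dict.getD_of_mem_items _ hmem (PySem.Dict.nodup_keys_ofList _) 0

lemma ofList_append_singleton (ps : List (String × Int)) (q : String × Int) :
    PySem.Dict.ofList (ps ++ [q]) = (PySem.Dict.ofList ps).insert q.1 q.2 := by
  show (ps ++ [q]).foldl (fun d p => d.insert p.1 p.2) PySem.Dict.empty = _
  rw [List.foldl_append]
  rfl

lemma emMapping_append (u : List String) (v : String) :
    emMapping (u ++ [v]) = (emMapping u).insert v ((u.length : Int) + 1) := by
  have he : PySem.List.enumerate [v] ((0 : Int) + u.length) = [((0 : Int) + u.length, v)] := by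
    simp [PySem.List.enumerate_cons, PySem.List.enumerate_nil]
  rw [emMapping, PySem.List.enumerate_append, he, List.map_append]
  simp only [List.map_cons, List.map_nil]
  rw [ofList_append_singleton]
  norm_num [emMapping]

lemma add_of_mem (u : List String) (v : String) (hv : v ∈ u) :
    PySem.Set.add u v = u := by
  simp [PySem.Set.add, PySem.Set.contains, hv]

lemma add_of_not_mem (u : List String) (v : String) (hv : v ∉ u) :
    PySem.Set.add u v = u ++ [v] := by
  simp [PySem.Set.add, PySem.Set.contains, hv]

lemma update_append (u l : List String) (hu : u.Nodup) :
    ∃ t, PySem.Set.update u l = u ++ t ∧ (u ++ t).Nodup := by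
  induction l generalizing u with
  | nil => exact ⟨[], (List.append_nil u).symm, by simpa using hu⟩
  | cons x l ih =>
    by_cases hx : x ∈ u
    · have h1 : PySem.Set.update u (x :: l) = PySem.Set.update u l := by
        show PySem.Set.update (PySem.Set.add u x) l = _
        rw [add_of_mem u x hx]
      rw [h1]; exact ih u hu
    · have h1 : PySem.Set.update u (x :: l) = PySem.Set.update (u ++ [x]) l := by
        show PySem.Set.update (PySem.Set.add u x) l = _
        rw [add_of_not_mem u x hx]
      have hnd : (u ++ [x]).Nodup := by
        simp [List.nodup_append, hu]
        exact fun a ha hax => hx (hax ▸ ha)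
      obtain ⟨t, ht, hnt⟩ := ih (u ++ [x]) hnd
      exact ⟨x :: t, by rw [h1, ht]; simp, by simpa [List.append_assoc] using hnt⟩

lemma loopA_eq (rest : List String) (u : List String) (enc : List Int) (hu : u.Nodup) :
    (rest.foldl emStep (emMapping u, (u.length : Int) + 1, enc)).2.2
    = enc ++ rest.map (fun v => (emMapping (PySem.Set.update u rest)).getD v 0) := by
  induction rest generalizing u enc with
  | nil => simp
  | cons v rest ih =>
    rw [List.foldl_cons]
    by_cases hv : v ∈ u
    · have hc : (emMapping u).contains v = true := by
        rw [contains_emMapping u hu]; simp [hv]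
      have hstep : emStep (emMapping u, (u.length : Int) + 1, enc) v
          = (emMapping u, (u.length : Int) + 1, enc ++ [(emMapping u).getD v 0]) := by
        simp [emStep, hc]
      rw [hstep, ih u _ hu]
      have hupd : PySem.Set.update u (v :: rest) = PySem.Set.update u rest := by
        show PySem.Set.update (PySem.Set.add u v) rest = _
        rw [add_of_mem u v hv]
      rw [hupd, List.map_cons]
      obtain ⟨k, hk⟩ : ∃ k, PySem.List.index? u v = some k :=
        Option.isSome_iff_exists.mp ((PySem.List.index?_isSome_iff u v).mpr hv)
      obtain ⟨t, ht, hnt⟩ := update_append u rest hu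
      have h1 : (emMapping u).getD v 0 = (k : Int) + 1 := getD_emMapping u hu v k hk
      have h2 : (emMapping (PySem.Set.update u rest)).getD v 0 = (k : Int) + 1 := by
        rw [ht]
        refine getD_emMapping _ hnt v k ?_
        rw [PySem.List.index?_append_of_mem t hv]; exact hk
      simp [h1, h2]
    · have hc : (emMapping u).contains v = false := by
        rw [contains_emMapping u hu]; simp [hv]
      have hnd : (u ++ [v]).Nodup := by
        simp [List.nodup_append, hu]
        exact fun a ha hav => hv (hav ▸ ha)
      have hstep : emStep (emMapping u, (u.length : Int) + 1, enc) v
          = (emMapping (u ++ [v]), ((u ++ [v]).length : Int) + 1,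
             enc ++ [(u.length : Int) + 1]) := by
        simp [emStep, hc, emMapping_append, PySem.Dict.getD_insert_self]
      rw [hstep, ih (u ++ [v]) _ hnd]
      have hupd : PySem.Set.update u (v :: rest) = PySem.Set.update (u ++ [v]) rest := by
        show PySem.Set.update (PySem.Set.add u v) rest = _
        rw [add_of_not_mem u v hv]
      rw [hupd, List.map_cons]
      obtain ⟨t, ht, hnt⟩ := update_append (u ++ [v]) rest hnd
      have hidx : PySem.List.index? ((u ++ [v]) ++ t) v = some u.length := by
        rw [PySem.List.index?_append_of_mem t (by simp)]
        exact PySem.List.index?_append_singleton_self u v hv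
      have h2 : (emMapping (PySem.Set.update (u ++ [v]) rest)).getD v 0 = (u.length : Int) + 1 := by
        rw [ht]; exact getD_emMapping _ hnt v u.length hidx
      simp [h2]

lemma email_mapper_eq_map (col : List String) :
    email_mapper col
      = col.map (fun v => (emMapping (PySem.Set.ofList col)).getD v 0) := by
  calc email_mapper col
      = (col.foldl emStep (emMapping [], ((List.length ([] : List String) : Int)) + 1, [])).2.2 := rfl
    _ = [] ++ col.map (fun v => (emMapping (PySem.Set.update [] col)).getD v 0) :=
        loopA_eq col [] [] List.nodup_nil
    _ = _ := by simp [PySem.Set.update_nil_left]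

-- ---- the index of v in set(col) via the distinct count of the first-occurrence prefix ----
lemma ofList_take_index (l : List String) : ∀ (acc : List String) (v : String) (k : Nat),
    acc.Nodup → v ∉ acc → PySem.List.index? l v = some k →
    PySem.List.index? (PySem.Set.update acc l) v
        = some ((PySem.Set.update acc (l.take (k+1))).length - 1)
      ∧ acc.length < (PySem.Set.update acc (l.take (k+1))).length := by
  induction l with
  | nil => intro acc v k _ _ hk; simp [PySem.List.index?_eq_idxOf?] at hk
  | cons x t ih =>
    intro acc v k hacc hv hk
    by_cases hx : x = v
    · subst hx
      have hk0 : k = 0 := by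
        rw [PySem.List.index?_cons_self] at hk
        simpa using hk.symm
      subst hk0
      have h1 : PySem.Set.update acc ((x :: t).take (0+1)) = acc ++ [x] := by
        show PySem.Set.update (PySem.Set.add acc x) [] = _
        rw [add_of_not_mem acc x hv]
        rfl
      have hnd : (acc ++ [x]).Nodup := by
        simp [List.nodup_append, hacc]
        exact fun a ha hax => hv (hax ▸ ha)
      refine ⟨?_, by rw [h1]; simp⟩
      have h2 : PySem.Set.update acc (x :: t) = PySem.Set.update (acc ++ [x]) t := by
        show PySem.Set.update (PySem.Set.add acc x) t = _
        rw [add_of_not_mem acc x hv]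
      rw [h2, h1]
      obtain ⟨u, hu, hnu⟩ := update_append (acc ++ [x]) t hnd
      rw [hu, PySem.List.index?_append_of_mem u (by simp),
        PySem.List.index?_append_singleton_self acc x hv]
      congr 1
      simp
    · have hxv : x ≠ v := hx
      rw [PySem.List.index?_cons_of_ne _ hxv] at hk
      obtain ⟨k', hk', hkk⟩ := Option.map_eq_some_iff.mp hk
      subst hkk
      have hstep : ∀ s : List String, PySem.Set.update acc (x :: s)
          = PySem.Set.update (PySem.Set.add acc x) s := fun s => rfl
      have htake : (x :: t).take (k' + 1 + 1) = x :: t.take (k' + 1) := rfl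
      rw [hstep, htake, hstep]
      have hnd' : (PySem.Set.add acc x).Nodup := by
        by_cases hxm : x ∈ acc
        · rw [add_of_mem acc x hxm]; exact hacc
        · rw [add_of_not_mem acc x hxm]
          simp [List.nodup_append, hacc]
          exact fun a ha hax => hxm (hax ▸ ha)
      have hv' : v ∉ PySem.Set.add acc x := by
        by_cases hxm : x ∈ acc
        · rw [add_of_mem acc x hxm]; exact hv
        · rw [add_of_not_mem acc x hxm]
          simp only [List.mem_append, List.mem_singleton]
          rintro (h | h)
          · exact hv h
          · exact hxv h.symm
      have hle : acc.length ≤ (PySem.Set.add acc x).length := by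
        by_cases hxm : x ∈ acc
        · rw [add_of_mem acc x hxm]
        · rw [add_of_not_mem acc x hxm]; simp
      obtain ⟨c1, c2⟩ := ih (PySem.Set.add acc x) v k' hnd' hv' hk'
      exact ⟨c1, lt_of_le_of_lt hle c2⟩

-- ---- B-side step 1: the sorted order, identified ----
lemma sorted2_eq_sorted_lex (xs : List Int) (k1 : Int → String) (k2 : Int → Int) :
    PySem.List.sorted2 xs k1 k2
      = PySem.List.sorted xs (fun x => toLex (k1 x, k2 x)) := by
  have h : PySem.List.sorted2 xs k1 k2
      = xs.foldl (fun acc x => PySem.List.insertBy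
          (fun a b => decide (k1 a < k1 b) || (!decide (k1 b < k1 a) && decide (k2 a < k2 b))) x acc) [] := rfl
  rw [h, PySem.List.sorted_eq_foldl_insertBy]
  have hc : (fun (a b : Int) => decide (k1 a < k1 b) || (!decide (k1 b < k1 a) && decide (k2 a < k2 b)))
      = fun a b => decide ((toLex (k1 a, k2 a) : Lex (String × Int)) < toLex (k1 b, k2 b)) := by
    funext a b
    rcases lt_trichotomy (k1 a) (k1 b) with hlt | heq | hgt
    · simp [Prod.Lex.lt_iff, hlt, asymm hlt]
    · simp [Prod.Lex.lt_iff, heq]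
    · simp [Prod.Lex.lt_iff, hgt, asymm hgt, hgt.ne']
  rw [hc]

lemma svals_pairwise (col : List String) : (emSvals col).Pairwise (· < ·) := by
  have h := PySem.List.sorted_ofList_pairwise_lt (κ := String) col
  simpa [emSvals] using h

lemma svals_nodup (col : List String) : (emSvals col).Nodup :=
  (svals_pairwise col).imp ne_of_lt

lemma mem_svals (col : List String) (v : String) : v ∈ emSvals col ↔ v ∈ col := by
  simp [emSvals, PySem.List.mem_sorted]

lemma mem_emGrp (col : List String) (v : String) (i : Int) :
    i ∈ emGrp col v ↔ 0 ≤ i ∧ i < (col.length : Int) ∧ emVal col i = v := by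
  simp [emGrp, List.mem_filter, PySem.List.mem_pyRange_one, and_assoc]

lemma emGrp_pairwise (col : List String) (v : String) : (emGrp col v).Pairwise (· < ·) :=
  (PySem.List.pairwise_lt_pyRange_one 0 (col.length : Int)).filter _

lemma emVal_natCast (col : List String) (k : Nat) : emVal col (k : Int) = col.getD k "" := by
  simp [emVal, PySem.List.pyGetD_natCast]

lemma emFirstN_spec (col : List String) (v : String) (hv : v ∈ col) :
    emFirstN col v < col.length ∧ col.getD (emFirstN col v) "" = v
      ∧ ∀ j, j < emFirstN col v → col.getD j "" ≠ v := by
  obtain ⟨k, hk⟩ : ∃ k, PySem.List.index? col v = some k :=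
    Option.isSome_iff_exists.mp ((PySem.List.index?_isSome_iff col v).mpr hv)
  obtain ⟨hlt, hget, hmin⟩ := PySem.List.getElem_of_index?_eq_some hk
  have hf : emFirstN col v = k := by simp only [emFirstN, hk, Option.getD_some]
  refine ⟨hf ▸ hlt, ?_, ?_⟩
  · rw [hf, List.getD_eq_getElem col "" hlt, hget]
  · intro j hj
    rw [hf] at hj
    rw [List.getD_eq_getElem col "" (lt_trans hj hlt)]
    exact hmin j hj

lemma emVal_mem (col : List String) {i : Int} (h0 : 0 ≤ i) (h1 : i < (col.length : Int)) :
    emVal col i ∈ col := by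
  have hi : i = ((i.toNat : Nat) : Int) := by omega
  have hlt : i.toNat < col.length := by omega
  rw [hi, emVal_natCast, List.getD_eq_getElem col "" hlt]
  exact List.getElem_mem hlt

lemma filter_or_perm (l : List Int) (p q : Int → Bool) (hpq : ∀ x, p x = true → q x = false) :
    (l.filter p ++ l.filter q).Perm (l.filter (fun x => p x || q x)) := by
  induction l with
  | nil => simp
  | cons x t ih =>
    by_cases hp : p x = true
    · simp only [List.filter_cons, hp, hpq x hp, Bool.true_or, if_true, List.cons_append]
      simpa using ih.cons x
    · simp only [Bool.not_eq_true] at hp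
      by_cases hq : q x = true
      · simp only [List.filter_cons, hp, hq, Bool.or_true]
        refine List.perm_middle.trans ?_
        simpa using ih.cons x
      · simp only [Bool.not_eq_true] at hq
        simp only [List.filter_cons, hp, hq, Bool.false_or]
        exact ih

lemma emOrd_perm (col : List String) :
    (emOrd col).Perm (PySem.List.pyRange 0 (col.length : Int) 1) := by
  have key : ∀ vs : List String, vs.Nodup →
      ((vs.map (emGrp col)).flatten).Perm
        ((PySem.List.pyRange 0 (col.length : Int) 1).filter (fun i => decide (emVal col i ∈ vs))) := by
    intro vs hnd
    induction vs with
    | nil => simp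
    | cons v vs ih =>
      have hv : v ∉ vs := (List.nodup_cons.mp hnd).1
      have ih' := ih (List.nodup_cons.mp hnd).2
      have h1 : ((List.map (emGrp col) (v :: vs)).flatten)
          = emGrp col v ++ (vs.map (emGrp col)).flatten := by simp
      rw [h1]
      refine ((List.Perm.refl (emGrp col v)).append ih').trans ?_
      have h2 := filter_or_perm (PySem.List.pyRange 0 (col.length : Int) 1)
          (fun i => emVal col i == v) (fun i => decide (emVal col i ∈ vs))
          (by intro x hx
              have : emVal col x = v := by simpa using hx
              simp [this, hv])
      refine (h2.trans ?_)
      refine List.Perm.of_eq (List.filter_congr ?_)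
      intro i _
      by_cases h : emVal col i = v <;> simp [h]
  have hall := key (emSvals col) (svals_nodup col)
  have hfix : (PySem.List.pyRange 0 (col.length : Int) 1).filter
      (fun i => decide (emVal col i ∈ emSvals col)) = PySem.List.pyRange 0 (col.length : Int) 1 := by
    refine List.filter_eq_self.mpr ?_
    intro i hi
    rcases (PySem.List.mem_pyRange_one).mp hi with ⟨h0, h1⟩
    simp [mem_svals, emVal_mem col h0 h1]
  rw [hfix] at hall
  exact hall

lemma emOrd_pairwise (col : List String) :
    (emOrd col).Pairwise (fun a b =>
      (toLex (emVal col a, a) : Lex (String × Int)) < toLex (emVal col b, b)) := by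
  rw [emOrd, List.pairwise_flatten]
  constructor
  · intro l hl
    obtain ⟨v, hv, rfl⟩ := List.mem_map.mp hl
    refine (emGrp_pairwise col v).imp_of_mem ?_
    intro a b ha hb hab
    have hva : emVal col a = v := ((mem_emGrp col v a).mp ha).2.2
    have hvb : emVal col b = v := ((mem_emGrp col v b).mp hb).2.2
    rw [Prod.Lex.lt_iff]
    exact Or.inr ⟨by simp [hva, hvb], hab⟩
  · rw [List.pairwise_map]
    refine (svals_pairwise col).imp ?_
    intro v w hvw a ha b hb
    have hva : emVal col a = v := ((mem_emGrp col v a).mp ha).2.2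
    have hvb : emVal col b = w := ((mem_emGrp col w b).mp hb).2.2
    rw [Prod.Lex.lt_iff]
    exact Or.inl (by simp [hva, hvb, hvw])

lemma order_eq (col : List String) :
    PySem.List.sorted2 (PySem.List.pyRange 0 (col.length : Int) 1)
      (fun i => PySem.List.pyGetD col i "") (fun i => i) = emOrd col := by
  rw [sorted2_eq_sorted_lex]
  exact PySem.List.sorted_eq_of_perm_of_pairwise_lt _ _ _ (emOrd_perm col) (emOrd_pairwise col)

-- head of the group = first occurrence
lemma head_min {l : List Int} (hp : l.Pairwise (· < ·)) {m : Int}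
    (hm : m ∈ l) (hmin : ∀ x ∈ l, m ≤ x) : ∃ t, l = m :: t := by
  cases l with
  | nil => cases hm
  | cons a t =>
    rcases List.mem_cons.mp hm with rfl | hmt
    · exact ⟨t, rfl⟩
    · have h1 : a < m := (List.pairwise_cons.mp hp).1 m hmt
      have h2 : m ≤ a := hmin a List.mem_cons_self
      omega

lemma emGrp_cons (col : List String) (v : String) (hv : v ∈ col) :
    ∃ t, emGrp col v = ((emFirstN col v : Nat) : Int) :: t := by
  obtain ⟨hlt, hget, hmin⟩ := emFirstN_spec col v hv
  have hmem : ((emFirstN col v : Nat) : Int) ∈ emGrp col v := by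
    rw [mem_emGrp]
    exact ⟨by positivity, by exact_mod_cast hlt, by rw [emVal_natCast]; exact hget⟩
  have hge : ∀ i ∈ emGrp col v, ((emFirstN col v : Nat) : Int) ≤ i := by
    intro i hi
    rcases (mem_emGrp col v i).mp hi with ⟨h0, h1, h2⟩
    by_contra hcon
    push Not at hcon
    have hjlt : i.toNat < emFirstN col v := by omega
    have : col.getD i.toNat "" = v := by
      have hi' : i = ((i.toNat : Nat) : Int) := by omega
      rw [hi', emVal_natCast] at h2
      exact h2
    exact hmin i.toNat hjlt this
  exact head_min (emGrp_pairwise col v) hmem hge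

-- ---- B-side step 2: the fp pass computes first-occurrence positions ----
lemma fpRest (col : List String) (v : String) (m : Int) (t : List Int) :
    (∀ i ∈ t, 0 ≤ i ∧ i < (col.length : Int) ∧ emVal col i = v) →
    ∀ (fp : List Int) (p : Int), fp.length = col.length →
      0 ≤ p → p < (col.length : Int) → emVal col p = v → PySem.List.pyGetD fp p 0 = m →
      (t.foldl (emStepB col) (fp, p)).1.length = col.length
      ∧ (0 ≤ (t.foldl (emStepB col) (fp, p)).2
          ∧ (t.foldl (emStepB col) (fp, p)).2 < (col.length : Int)
          ∧ emVal col (t.foldl (emStepB col) (fp, p)).2 = v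
          ∧ PySem.List.pyGetD (t.foldl (emStepB col) (fp, p)).1 (t.foldl (emStepB col) (fp, p)).2 0 = m)
      ∧ ∀ j : Nat, j < col.length →
          PySem.List.pyGetD (t.foldl (emStepB col) (fp, p)).1 (j : Int) 0
            = if (j : Int) ∈ t then m else PySem.List.pyGetD fp (j : Int) 0 := by
  induction t with
  | nil =>
    intro _ fp p hlen hp0 hp1 hpv hget
    exact ⟨hlen, ⟨hp0, hp1, hpv, hget⟩, fun j _ => by simp⟩
  | cons i t ih =>
    intro ht fp p hlen hp0 hp1 hpv hget
    obtain ⟨hi0, hi1, hiv⟩ := ht i List.mem_cons_self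
    have ht' : ∀ x ∈ t, 0 ≤ x ∧ x < (col.length : Int) ∧ emVal col x = v :=
      fun x hx => ht x (List.mem_cons_of_mem i hx)
    have hiN : i = ((i.toNat : Nat) : Int) := by omega
    have hiNlt : i.toNat < col.length := by omega
    have hstep : emStepB col (fp, p) i = (PySem.List.pySetD fp i m, i) := by
      rw [emStepB]
      rw [if_pos ⟨hp0, by rw [show PySem.List.pyGetD col p "" = emVal col p from rfl,
            show PySem.List.pyGetD col i "" = emVal col i from rfl, hpv, hiv]⟩, hget]
    rw [List.foldl_cons, hstep]
    have hget' : PySem.List.pyGetD (PySem.List.pySetD fp i m) i 0 = m := by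
      rw [hiN, PySem.List.pyGetD_pySetD_natCast fp i.toNat i.toNat m 0 (hlen ▸ hiNlt)]
      simp
    have hlen' : (PySem.List.pySetD fp i m).length = col.length := by
      rw [PySem.List.length_pySetD]; exact hlen
    obtain ⟨c1, c2, c3⟩ := ih ht' (PySem.List.pySetD fp i m) i hlen' hi0 hi1 hiv hget'
    refine ⟨c1, c2, ?_⟩
    intro j hj
    rw [c3 j hj]
    by_cases hjt : (j : Int) ∈ t
    · simp [hjt]
    · rw [if_neg hjt]
      have hrd : PySem.List.pyGetD (PySem.List.pySetD fp i m) (j : Int) 0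
          = if j = i.toNat then m else PySem.List.pyGetD fp (j : Int) 0 := by
        rw [hiN]; exact PySem.List.pyGetD_pySetD_natCast fp i.toNat j m 0 (hlen ▸ hiNlt)
      rw [hrd]
      by_cases hji : j = i.toNat
      · have hj_i : (j : Int) = i := by omega
        rw [if_pos hji, if_pos (by rw [hj_i]; exact List.mem_cons_self)]
      · have hj_i : (j : Int) ≠ i := by omega
        rw [if_neg hji, if_neg (by simp [hj_i, hjt])]

lemma fpGroup (col : List String) (v : String) (hv : v ∈ col) (fp : List Int) (p : Int)
    (hlen : fp.length = col.length)
    (hp : p = -1 ∨ (0 ≤ p ∧ p < (col.length : Int) ∧ emVal col p ≠ v)) :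
    ((emGrp col v).foldl (emStepB col) (fp, p)).1.length = col.length
    ∧ (0 ≤ ((emGrp col v).foldl (emStepB col) (fp, p)).2
        ∧ ((emGrp col v).foldl (emStepB col) (fp, p)).2 < (col.length : Int)
        ∧ emVal col ((emGrp col v).foldl (emStepB col) (fp, p)).2 = v)
    ∧ ∀ j : Nat, j < col.length →
        PySem.List.pyGetD ((emGrp col v).foldl (emStepB col) (fp, p)).1 (j : Int) 0
          = if emVal col (j : Int) = v then ((emFirstN col v : Nat) : Int)
            else PySem.List.pyGetD fp (j : Int) 0 := by
  obtain ⟨t, hgt⟩ := emGrp_cons col v hv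
  obtain ⟨hmlt, hmget, _⟩ := emFirstN_spec col v hv
  set mI : Int := ((emFirstN col v : Nat) : Int) with hmI
  have hmval : emVal col mI = v := by rw [hmI, emVal_natCast]; exact hmget
  have hm0 : 0 ≤ mI := by omega
  have hm1 : mI < (col.length : Int) := by omega
  have hstep : emStepB col (fp, p) mI = (PySem.List.pySetD fp mI mI, mI) := by
    rw [emStepB, if_neg]
    rintro ⟨hp0, hpe⟩
    rcases hp with rfl | ⟨_, _, hne⟩
    · exact absurd hp0 (by norm_num)
    · exact hne (hpe.trans hmval)
  have ht : ∀ i ∈ t, 0 ≤ i ∧ i < (col.length : Int) ∧ emVal col i = v := by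
    intro i hi
    exact (mem_emGrp col v i).mp (hgt ▸ List.mem_cons_of_mem _ hi)
  have hget' : PySem.List.pyGetD (PySem.List.pySetD fp mI mI) mI 0 = mI := by
    rw [hmI, PySem.List.pyGetD_pySetD_natCast fp _ _ _ 0 (hlen ▸ hmlt)]
    simp
  have hlen' : (PySem.List.pySetD fp mI mI).length = col.length := by
    rw [PySem.List.length_pySetD]; exact hlen
  rw [hgt, List.foldl_cons, hstep]
  obtain ⟨c1, ⟨c20, c21, c2v, _⟩, c3⟩ :=
    fpRest col v mI t ht (PySem.List.pySetD fp mI mI) mI hlen' hm0 hm1 hmval hget'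
  refine ⟨c1, ⟨c20, c21, c2v⟩, ?_⟩
  intro j hj
  rw [c3 j hj]
  have hrd : PySem.List.pyGetD (PySem.List.pySetD fp mI mI) (j : Int) 0
      = if j = emFirstN col v then mI else PySem.List.pyGetD fp (j : Int) 0 := by
    rw [hmI]; exact PySem.List.pyGetD_pySetD_natCast fp _ j _ 0 (hlen ▸ hmlt)
  by_cases hval : emVal col (j : Int) = v
  · have hjmem : (j : Int) ∈ emGrp col v :=
      (mem_emGrp col v (j : Int)).mpr ⟨by positivity, by exact_mod_cast hj, hval⟩
    rw [hgt] at hjmem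
    by_cases hjt : (j : Int) ∈ t
    · simp [hjt, hval]
    · have heq : (j : Int) = mI := by
        rcases List.mem_cons.mp hjmem with h | h
        · exact h
        · exact absurd h hjt
      rw [hmI] at heq
      have hje : j = emFirstN col v := by omega
      rw [if_neg hjt, hrd, if_pos hje, if_pos hval]
  · have hjnot : (j : Int) ∉ emGrp col v := by
      rw [mem_emGrp]; rintro ⟨_, _, h⟩; exact hval h
    rw [hgt] at hjnot
    have hjt : (j : Int) ∉ t := fun h => hjnot (List.mem_cons_of_mem _ h)
    have hjm : ¬ j = emFirstN col v := by
      intro h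
      exact hjnot (by rw [h]; exact List.mem_cons_self)
    rw [if_neg hjt, hrd, if_neg hjm, if_neg hval]

lemma fpFold (col : List String) (vs : List String) :
    ∀ (fp : List Int) (p : Int),
    (∀ v ∈ vs, v ∈ col) → vs.Nodup → fp.length = col.length →
    (p = -1 ∨ (0 ≤ p ∧ p < (col.length : Int) ∧ emVal col p ∉ vs)) →
    (((vs.map (emGrp col)).flatten).foldl (emStepB col) (fp, p)).1.length = col.length
    ∧ ∀ j : Nat, j < col.length →
        PySem.List.pyGetD (((vs.map (emGrp col)).flatten).foldl (emStepB col) (fp, p)).1 (j : Int) 0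
          = if emVal col (j : Int) ∈ vs
            then ((emFirstN col (emVal col (j : Int)) : Nat) : Int)
            else PySem.List.pyGetD fp (j : Int) 0 := by
  induction vs with
  | nil =>
    intro fp p _ _ hlen _
    exact ⟨hlen, fun j _ => by simp⟩
  | cons v vs ih =>
    intro fp p hvs hnd hlen hp
    have hflat : ((List.map (emGrp col) (v :: vs)).flatten)
        = emGrp col v ++ (vs.map (emGrp col)).flatten := by simp
    rw [hflat, List.foldl_append]
    have hv : v ∈ col := hvs v List.mem_cons_self
    have hp' : p = -1 ∨ (0 ≤ p ∧ p < (col.length : Int) ∧ emVal col p ≠ v) := by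
      rcases hp with h | ⟨h0, h1, h2⟩
      · exact Or.inl h
      · exact Or.inr ⟨h0, h1, fun he => h2 (he ▸ List.mem_cons_self)⟩
    obtain ⟨g1, ⟨g20, g21, g2v⟩, g3⟩ := fpGroup col v hv fp p hlen hp'
    have hvnotvs : v ∉ vs := (List.nodup_cons.mp hnd).1
    obtain ⟨f1, f3⟩ := ih _ _ (fun w hw => hvs w (List.mem_cons_of_mem v hw))
        (List.nodup_cons.mp hnd).2 g1
        (Or.inr ⟨g20, g21, by rw [g2v]; exact hvnotvs⟩)
    refine ⟨f1, ?_⟩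
    intro j hj
    rw [f3 j hj]
    by_cases hin : emVal col (j : Int) ∈ vs
    · simp [hin]
    · rw [if_neg hin, g3 j hj]
      by_cases heq : emVal col (j : Int) = v
      · rw [if_pos heq, if_pos (by rw [heq]; exact List.mem_cons_self), heq]
      · rw [if_neg heq, if_neg (by simp [heq, hin])]

lemma fpAll (col : List String) :
    ((emOrd col).foldl (emStepB col) (List.replicate col.length 0, -1)).1.length = col.length
    ∧ ∀ j : Nat, j < col.length →
        PySem.List.pyGetD ((emOrd col).foldl (emStepB col) (List.replicate col.length 0, -1)).1 (j : Int) 0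
          = ((emFirstN col (col.getD j "") : Nat) : Int) := by
  obtain ⟨h1, h3⟩ := fpFold col (emSvals col) (List.replicate col.length 0) (-1)
      (fun v hv => (mem_svals col v).mp hv) (svals_nodup col)
      (List.length_replicate) (Or.inl rfl)
  refine ⟨h1, ?_⟩
  intro j hj
  have hjI : ((j : Nat) : Int) < (col.length : Int) := by exact_mod_cast hj
  have hmem : emVal col (j : Int) ∈ emSvals col :=
    (mem_svals col _).mpr (emVal_mem col (by positivity) hjI)
  rw [show emOrd col = ((emSvals col).map (emGrp col)).flatten from rfl]
  rw [h3 j hj, if_pos hmem, emVal_natCast]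

-- ---- B-side step 3: the counting pass ----
lemma emFirstN_self_iff (col : List String) (q : Nat) (hq : q < col.length) :
    emFirstN col (col.getD q "") = q ↔ emNew col q = true := by
  have hvmem : col.getD q "" ∈ col := by
    rw [List.getD_eq_getElem col "" hq]; exact List.getElem_mem hq
  obtain ⟨hlt, hget, hmin⟩ := emFirstN_spec col (col.getD q "") hvmem
  rw [emNew, decide_eq_true_eq]
  constructor
  · intro h hmem
    obtain ⟨j, hj, hje⟩ := List.getElem_of_mem hmem
    have hlen : (List.take q col).length = min q col.length := List.length_take
    have hjq : j < q := by omega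
    have hjc : j < col.length := lt_trans hjq hq
    rw [List.getElem_take] at hje
    exact hmin j (by omega) (by rw [List.getD_eq_getElem col "" hjc]; exact hje)
  · intro h
    have hle : emFirstN col (col.getD q "") ≤ q := by
      by_contra hcon
      push Not at hcon
      exact hmin q hcon rfl
    rcases lt_or_eq_of_le hle with hltq | heq
    · exfalso
      apply h
      have hq' : emFirstN col (col.getD q "") < (List.take q col).length := by
        have hlen : (List.take q col).length = min q col.length := List.length_take
        omega
      have hEl : (List.take q col)[emFirstN col (col.getD q "")]'hq' = col.getD q "" := by
        rw [List.getElem_take]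
        rw [List.getD_eq_getElem col "" hlt] at hget
        exact hget
      rw [← hEl]
      exact List.getElem_mem _
    · exact heq

lemma countP_emNew (col : List String) (m : Nat) (hm : m ≤ col.length) :
    (List.range m).countP (emNew col) = (PySem.Set.ofList (col.take m)).length := by
  induction m with
  | zero => simp [PySem.Set.ofList]
  | succ m ih =>
    have hmlt : m < col.length := hm
    have htake : col.take (m+1) = col.take m ++ [col[m]] := by
      rw [List.take_add_one, List.getElem?_eq_getElem hmlt]
      rfl
    have hupd : PySem.Set.ofList (col.take (m+1))
        = PySem.Set.add (PySem.Set.ofList (col.take m)) col[m] := by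
      rw [htake, PySem.Set.ofList_append]
      rfl
    rw [List.range_succ, List.countP_append, ih (le_of_lt hmlt), hupd]
    have hgd : col.getD m "" = col[m] := List.getD_eq_getElem col "" hmlt
    by_cases hmem : col[m] ∈ col.take m
    · have hmem' : col[m] ∈ PySem.Set.ofList (col.take m) := (PySem.Set.mem_ofList _ _).mpr hmem
      rw [add_of_mem _ _ hmem']
      have : emNew col m = false := by
        rw [emNew, hgd]; simp [hmem]
      simp [this]
    · have hmem' : col[m] ∉ PySem.Set.ofList (col.take m) := fun h => hmem ((PySem.Set.mem_ofList _ _).mp h)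
      rw [add_of_not_mem _ _ hmem']
      have : emNew col m = true := by
        rw [emNew, hgd]; simp [hmem]
      simp [this]

lemma idsLoop (col : List String) (fp : List Int)
    (hfp : ∀ j : Nat, j < col.length →
      PySem.List.pyGetD fp (j : Int) 0 = ((emFirstN col (col.getD j "") : Nat) : Int)) :
    ∀ m : Nat, m ≤ col.length →
    (((List.range m).map (fun k : Nat => (k : Int))).foldl (emStepC fp) (List.replicate col.length 0, 0)).1.length = col.length
    ∧ (((List.range m).map (fun k : Nat => (k : Int))).foldl (emStepC fp) (List.replicate col.length 0, 0)).2
        = ((List.range m).countP (emNew col) : Int)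
    ∧ ∀ j : Nat, j < col.length →
        PySem.List.pyGetD (((List.range m).map (fun k : Nat => (k : Int))).foldl (emStepC fp) (List.replicate col.length 0, 0)).1 (j : Int) 0
          = if emNew col j = true ∧ j < m then (((List.range (j+1)).countP (emNew col) : Nat) : Int) else 0 := by
  intro m
  induction m with
  | zero =>
    intro _
    refine ⟨by simp, by simp, ?_⟩
    intro j hj
    simp [PySem.List.pyGetD_natCast]
  | succ m ih =>
    intro hm
    have hmlt : m < col.length := hm
    obtain ⟨i1, i2, i3⟩ := ih (le_of_lt hmlt)
    rw [List.range_succ, List.map_append, List.foldl_append, List.map_cons, List.map_nil]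
    set st := ((List.range m).map (fun k : Nat => (k : Int))).foldl (emStepC fp) (List.replicate col.length 0, 0) with hst
    by_cases hnew : emNew col m = true
    · have hcond : PySem.List.pyGetD fp ((m : Nat) : Int) 0 = ((m : Nat) : Int) := by
        have he : emFirstN col (col.getD m "") = m := (emFirstN_self_iff col m hmlt).mpr hnew
        rw [hfp m hmlt, he]
      have hstep : List.foldl (emStepC fp) st [((m : Nat) : Int)]
          = (PySem.List.pySetD st.1 ((m : Nat) : Int) (st.2 + 1), st.2 + 1) := by
        simp only [List.foldl_cons, List.foldl_nil, emStepC, if_pos hcond]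
      rw [hstep]
      refine ⟨by rw [PySem.List.length_pySetD]; exact i1, ?_, ?_⟩
      · simp only [i2, List.countP_append]
        have h1 : List.countP (emNew col) [m] = 1 := by simp [hnew]
        rw [h1]
        push_cast
        ring
      · intro j hj
        have hrd : PySem.List.pyGetD (PySem.List.pySetD st.1 ((m : Nat) : Int) (st.2 + 1)) ((j : Nat) : Int) 0
            = if j = m then st.2 + 1 else PySem.List.pyGetD st.1 ((j : Nat) : Int) 0 :=
          PySem.List.pyGetD_pySetD_natCast st.1 m j (st.2 + 1) 0 (i1 ▸ hmlt)
        rw [hrd]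
        by_cases hjm : j = m
        · subst hjm
          rw [if_pos rfl, if_pos ⟨hnew, Nat.lt_succ_self j⟩, i2]
          have h2 : ((List.range (j+1)).countP (emNew col))
              = (List.range j).countP (emNew col) + 1 := by
            rw [List.range_succ, List.countP_append]
            simp [hnew]
          rw [h2]
          push_cast
          ring
        · rw [if_neg hjm, i3 j hj]
          have : (emNew col j = true ∧ j < m + 1) ↔ (emNew col j = true ∧ j < m) := by
            constructor
            · rintro ⟨h1, h2⟩; exact ⟨h1, by omega⟩
            · rintro ⟨h1, h2⟩; exact ⟨h1, by omega⟩
          simp only [this]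
    · have hcond : ¬ (PySem.List.pyGetD fp ((m : Nat) : Int) 0 = ((m : Nat) : Int)) := by
        rw [hfp m hmlt]
        intro hEq
        exact hnew ((emFirstN_self_iff col m hmlt).mp (by exact_mod_cast hEq))
      have hstep : List.foldl (emStepC fp) st [((m : Nat) : Int)] = st := by
        simp only [List.foldl_cons, List.foldl_nil, emStepC, if_neg hcond]
      rw [hstep]
      refine ⟨i1, ?_, ?_⟩
      · simp only [i2, List.countP_append]
        simp [hnew]
      · intro j hj
        rw [i3 j hj]
        by_cases hjm : j = m
        · subst hjm
          simp [hnew]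
        · have : (emNew col j = true ∧ j < m + 1) ↔ (emNew col j = true ∧ j < m) := by
            constructor
            · rintro ⟨h1, h2⟩; exact ⟨h1, by omega⟩
            · rintro ⟨h1, h2⟩; exact ⟨h1, by omega⟩
          simp only [this]

-- ---- assembly ----
lemma pyRange_len_eq_map_range (n : Nat) :
    PySem.List.pyRange 0 (n : Int) 1 = (List.range n).map (fun k : Nat => (k : Int)) := by
  rw [PySem.List.pyRange_one]
  norm_num [List.map_eq_flatMap]

lemma email_mapper_alt_eq (col : List String) :
    email_mapper_alt col
      = (List.range col.length).map (fun k =>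
          (((PySem.Set.ofList (col.take (emFirstN col (col.getD k "") + 1))).length : Nat) : Int)) := by
  obtain ⟨hf1, hf3⟩ := fpAll col
  have hrep : PySem.List.pyRepeat [(0:Int)] ((col.length : Nat) : Int) = List.replicate col.length (0:Int) := by
    rw [PySem.List.pyRepeat_singleton]
    simp
  simp only [email_mapper_alt]
  rw [order_eq col, hrep]
  rw [pyRange_len_eq_map_range, List.map_map]
  obtain ⟨hI1, hI2, hI3⟩ := idsLoop col
      ((emOrd col).foldl (emStepB col) (List.replicate col.length 0, -1)).1 hf3
      col.length le_rfl
  refine List.map_congr_left ?_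
  intro k hk
  have hkn : k < col.length := List.mem_range.mp hk
  simp only [Function.comp_apply]
  rw [hf3 k hkn]
  have hvmem : col.getD k "" ∈ col := by
    rw [List.getD_eq_getElem col "" hkn]; exact List.getElem_mem hkn
  obtain ⟨helt, heget, _⟩ := emFirstN_spec col (col.getD k "") hvmem
  have hnew : emNew col (emFirstN col (col.getD k "")) = true := by
    refine (emFirstN_self_iff col _ helt).mp ?_
    rw [heget]
  rw [hI3 _ helt, if_pos ⟨hnew, helt⟩, countP_emNew col _ (by omega)]

-- ===== VERDICT (by name: the statement is the Claim_ definition above) =====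
theorem email_mapper_spec : Claim_equal_email_mapper := by
  intro col _
  show email_mapper col = email_mapper_alt col
  rw [email_mapper_eq_map, email_mapper_alt_eq]
  apply List.ext_getElem
  · simp
  · intro k h1 h2
    simp only [List.getElem_map, List.getElem_range]
    have hk : k < col.length := by simpa using h1
    have hvmem : col[k] ∈ col := List.getElem_mem hk
    have hgd : col.getD k "" = col[k] := List.getD_eq_getElem col "" hk
    obtain ⟨e, he⟩ : ∃ e, PySem.List.index? col col[k] = some e :=
      Option.isSome_iff_exists.mp ((PySem.List.index?_isSome_iff _ _).mpr hvmem)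
    have heN : emFirstN col col[k] = e := by simp only [emFirstN, he, Option.getD_some]
    obtain ⟨hidx, hlen⟩ := ofList_take_index col [] col[k] e List.nodup_nil (by simp) he
    simp only [PySem.Set.update_nil_left] at hidx hlen
    have hgetd := getD_emMapping (PySem.Set.ofList col) (PySem.Set.nodup_ofList col) col[k] _ hidx
    rw [hgetd, hgd, heN]
    have h0 : 0 < (PySem.Set.ofList (col.take (e+1))).length := by simpa using hlen
    omega
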